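-- pv_equiv track=rewrite | github.com/gary60182007/diu9u-obfuscator | rebuild_source2.py | _remove_empty_blocks
-- ===== SOURCE A (Python) =====
-- def _remove_empty_blocks(stmts):
--     changed = True
--     while changed:
--         changed = False
--         out = []
--         i = 0
--         while i < len(stmts):
--             s = stmts[i]
--             if s.startswith('if ') and s.endswith(' then'):
--                 if i + 1 < len(stmts) and stmts[i+1] == 'end':
--                     i += 2; changed = True; continue
--                 if i + 1 >= len(stmts):
--                     i += 1; changed = True; continue
--             out.append(s)
--             i += 1
--         stmts = out
--     return stmts
-- ===== SOURCE B (Python) =====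
-- def _remove_empty_blocks(stmts):
--     # One pass: an 'end' cancels an immediately preceding surviving 'if ... then';
--     # then strip trailing 'if ... then' lines.
--     stack = []
--     for s in stmts:
--         if s == 'end' and stack and stack[-1].startswith('if ') and stack[-1].endswith(' then'):
--             stack.pop()
--         else:
--             stack.append(s)
--     while stack and stack[-1].startswith('if ') and stack[-1].endswith(' then'):
--         stack.pop()
--     return stack
-- ===== Notes on version B (the rewrite author's own statement) =====
-- stated objective: faster
-- what changed: Replaces A's repeat-until-no-change rescanning (each round re-scans the whole list to drop adjacent if-then/end pairs) with a single stack pass that cancels each 'end' against an immediately preceding surviving if-then, followed by stripping trailing if-then lines.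
import Mathlib
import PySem

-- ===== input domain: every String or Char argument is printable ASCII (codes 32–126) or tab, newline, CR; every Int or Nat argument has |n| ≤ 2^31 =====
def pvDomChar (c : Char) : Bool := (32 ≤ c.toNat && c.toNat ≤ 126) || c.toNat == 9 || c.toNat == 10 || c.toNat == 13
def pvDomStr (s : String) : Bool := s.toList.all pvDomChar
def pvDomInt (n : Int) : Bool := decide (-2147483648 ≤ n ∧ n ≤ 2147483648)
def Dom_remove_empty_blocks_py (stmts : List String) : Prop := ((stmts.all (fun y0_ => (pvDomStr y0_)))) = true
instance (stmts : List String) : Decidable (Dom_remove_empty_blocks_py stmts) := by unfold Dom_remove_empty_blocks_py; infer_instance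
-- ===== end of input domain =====

-- B replaces A's repeat-until-fixpoint quadratic scan by one stack pass plus a trailing strip (O(n)).

-- ===== PORT A =====
-- "s.startswith('if ') and s.endswith(' then')"
def isIfThen (s : String) : Bool :=
  PySem.Str.startswith s "if " && PySem.Str.endswith s " then"

-- A's inner while loop over index i, as structural recursion on the remaining list.
def passA : List String → List String × Bool
  | [] => ([], false)
  | [s] =>
    if isIfThen s then ([], true)                       -- i+1 >= len: i += 1; changed = True
    else ([s], false)                                   -- out.append(s)
  | s :: r :: rs =>
    if isIfThen s then
      if r = "end" then ((passA rs).1, true)            -- i += 2; changed = True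
      else let t := passA (r :: rs); (s :: t.1, t.2)    -- out.append(s)
    else
      let t := passA (r :: rs); (s :: t.1, t.2)

-- termination fact for A's outer while loop (cited by decreasing_by below)
theorem passA_length : ∀ xs : List String,
    (passA xs).1.length ≤ xs.length ∧ ((passA xs).2 = true → (passA xs).1.length < xs.length) := by
  intro xs
  fun_induction passA xs <;> simp_all <;> omega

-- A's outer "while changed" loop
def remove_empty_blocks_py (stmts : List String) : List String :=
  if h : (passA stmts).2 = true then
    remove_empty_blocks_py (passA stmts).1
  else
    (passA stmts).1
termination_by stmts.length
decreasing_by exact (passA_length stmts).2 h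

-- ===== PORT B =====
-- B's for-loop body: the Python list used as a stack (append/pop at the end) is
-- represented head-first (head = top); the final list is reversed back.
def stepB (stack : List String) (s : String) : List String :=
  if s == "end" then
    match stack with
    | t :: ts => if isIfThen t then ts else s :: stack
    | [] => [s]
  else s :: stack

def remove_empty_blocks_py_alt (stmts : List String) : List String :=
  (((stmts.foldl stepB []).dropWhile isIfThen)).reverse

-- ===== PRECONDITION & SPEC =====
def Spec_remove_empty_blocks_py (stmts : List String) (out : List String) : Prop := out = remove_empty_blocks_py_alt stmts
instance (stmts : List String) (out : List String) : Decidable (Spec_remove_empty_blocks_py stmts out) := by unfold Spec_remove_empty_blocks_py; infer_instance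

-- ===== CLAIM (what is proved, stated in full; the proofs are below) =====
def Claim_equal_remove_empty_blocks_py : Prop := ∀ (stmts : List String), Dom_remove_empty_blocks_py stmts → Spec_remove_empty_blocks_py stmts (remove_empty_blocks_py stmts)

-- ===== LEMMAS AND PROOFS =====

theorem isIfThen_ne_end {s : String} (h : isIfThen s = true) : s ≠ "end" := by
  rintro rfl; revert h; decide

-- One A-pass does not change B's stack result (up to the trailing strip).
theorem pass_foldl : ∀ (xs stack : List String),
    ((passA xs).1.foldl stepB stack).dropWhile isIfThen
      = (xs.foldl stepB stack).dropWhile isIfThen := by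
  intro xs
  fun_induction passA xs with
  | case1 => intro stack; rfl
  | case2 s hif =>
    intro stack
    have hne : (s == "end") = false := by simp [isIfThen_ne_end hif]
    simp [stepB, hne, hif]
  | case3 s hif => intro stack; rfl
  | case4 s rs hif ih =>
    intro stack
    have hne : (s == "end") = false := by simp [isIfThen_ne_end hif]
    simp only [List.foldl_cons]
    rw [ih stack]
    simp [stepB, hne, hif]
  | case5 s r rs hif hr t ih =>
    intro stack
    simp only [List.foldl_cons]
    exact ih (stepB stack s)
  | case6 s r rs hif t ih =>
    intro stack
    simp only [List.foldl_cons]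
    exact ih (stepB stack s)

-- If a pass changed nothing, it is the identity.
theorem pass_id : ∀ xs : List String, (passA xs).2 = false → (passA xs).1 = xs := by
  intro xs
  fun_induction passA xs with
  | case1 => intro _; rfl
  | case2 s hif => intro hc; simp at hc
  | case3 s hif => intro _; rfl
  | case4 s rs hif ih => intro hc; simp at hc
  | case5 s r rs hif hr t ih => intro hc; exact congrArg (s :: ·) (ih hc)
  | case6 s r rs hif t ih => intro hc; exact congrArg (s :: ·) (ih hc)

-- If a pass changed nothing, B's stack pass just reverses the list …
theorem noChange_foldl : ∀ (xs stack : List String),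
    (passA xs).2 = false →
    (∀ t ts, stack = t :: ts → isIfThen t = true → xs.head? ≠ some "end") →
    xs.foldl stepB stack = xs.reverse ++ stack := by
  intro xs
  induction xs with
  | nil => intro stack _ _; simp
  | cons s rest ih =>
    intro stack hc hsafe
    have hstep : stepB stack s = s :: stack := by
      unfold stepB
      by_cases hs : s = "end"
      · subst hs
        cases stack with
        | nil => simp
        | cons t ts =>
          have : isIfThen t = false := by
            by_contra h
            exact hsafe t ts rfl (by simpa using h) rfl
          simp [this]
      · simp [hs]
    have hrestc : (passA rest).2 = false := by
      cases rest with
      | nil => rfl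
      | cons r rs =>
        by_cases hif : isIfThen s = true
        · by_cases hr : r = "end"
          · subst hr; simp [passA, hif] at hc
          · simp only [passA, hif, hr] at hc
            exact hc
        · simp only [Bool.not_eq_true] at hif
          simp [passA, hif] at hc
          exact hc
    have hsafe' : ∀ t ts, s :: stack = t :: ts → isIfThen t = true → rest.head? ≠ some "end" := by
      intro t ts he hift
      injection he with h1 _
      subst h1
      cases rest with
      | nil => simp
      | cons r rs =>
        intro hh
        simp at hh
        subst hh
        simp [passA, hift] at hc
    calc (s :: rest).foldl stepB stack = rest.foldl stepB (s :: stack) := by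
            simp [List.foldl_cons, hstep]
      _ = rest.reverse ++ s :: stack := ih (s :: stack) hrestc hsafe'
      _ = (s :: rest).reverse ++ stack := by simp

-- … and the list has no trailing if-then line.
theorem noChange_last : ∀ xs : List String, (passA xs).2 = false →
    ∀ t, xs.getLast? = some t → isIfThen t = false := by
  intro xs
  fun_induction passA xs with
  | case1 => intro _ t h; simp at h
  | case2 s hif => intro hc; simp at hc
  | case3 s hif =>
    intro _ u hlast
    simp at hlast
    subst hlast
    simpa using hif
  | case4 s rs hif ih => intro hc; simp at hc
  | case5 s r rs hif hr t ih =>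
    intro hc u hlast
    have hgl : (s :: r :: rs).getLast? = (r :: rs).getLast? := by simp
    exact ih hc u (by rw [← hgl]; exact hlast)
  | case6 s r rs hif t ih =>
    intro hc u hlast
    have hgl : (s :: r :: rs).getLast? = (r :: rs).getLast? := by simp
    exact ih hc u (by rw [← hgl]; exact hlast)

theorem main_eq : ∀ xs : List String, remove_empty_blocks_py xs = remove_empty_blocks_py_alt xs := by
  intro xs
  fun_induction remove_empty_blocks_py xs with
  | case1 xs hc ih =>
    rw [ih]
    unfold remove_empty_blocks_py_alt
    rw [pass_foldl xs []]
  | case2 xs hc =>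
    simp only [Bool.not_eq_true] at hc
    rw [pass_id xs hc]
    unfold remove_empty_blocks_py_alt
    rw [noChange_foldl xs [] hc (by intro t ts h; simp at h)]
    simp only [List.append_nil]
    have hdrop : xs.reverse.dropWhile isIfThen = xs.reverse := by
      cases hx : xs.reverse with
      | nil => simp
      | cons a l =>
        have ha : xs.getLast? = some a := by
          rw [← List.head?_reverse, hx]; rfl
        simp [noChange_last xs hc a ha]
    rw [hdrop, List.reverse_reverse]

-- ===== VERDICT (by name: the statement is the Claim_ definition above) =====
theorem remove_empty_blocks_py_spec : Claim_equal_remove_empty_blocks_py := by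
  intro stmts _
  exact main_eq stmts
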